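-- pv_equiv track=rewrite | github.com/seulgiwendy/hipython2 | numberbaseball.py | ballcheck
-- ===== SOURCE A (Python) =====
-- def ballcheck(a, b):
--
--     user_ball_array = []
--     com_ball_array = []
--
--     com_ball_array = a
--     user_ball_array = b
--     k = 0
--     ball_count = 0
--
--     while( k < len(a)):
--         if ((user_ball_array[k] in com_ball_array) and not user_ball_array[k] == com_ball_array[k]):
--             ball_count += 1
--
--         k += 1
--
--     return ball_count
-- ===== SOURCE B (Python) =====
-- def ballcheck(a, b):
--     n = len(a)
--     prefix = b[:n]
--     strikes = sum(1 for x, y in zip(a, prefix) if x == y)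
--     present = sum(prefix.count(v) for v in set(a))
--     return present - strikes
-- ===== Notes on version B (the rewrite author's own statement) =====
-- stated objective: alternative
-- what changed: B is value-centric: it takes the prefix b[:len(a)], counts for each distinct value of a how often it occurs in that prefix (total 'present'), counts same-position matches with one zip pass, and returns present - strikes; A instead loops over positions testing a membership-and-inequality conjunction per index.
import Mathlib
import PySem

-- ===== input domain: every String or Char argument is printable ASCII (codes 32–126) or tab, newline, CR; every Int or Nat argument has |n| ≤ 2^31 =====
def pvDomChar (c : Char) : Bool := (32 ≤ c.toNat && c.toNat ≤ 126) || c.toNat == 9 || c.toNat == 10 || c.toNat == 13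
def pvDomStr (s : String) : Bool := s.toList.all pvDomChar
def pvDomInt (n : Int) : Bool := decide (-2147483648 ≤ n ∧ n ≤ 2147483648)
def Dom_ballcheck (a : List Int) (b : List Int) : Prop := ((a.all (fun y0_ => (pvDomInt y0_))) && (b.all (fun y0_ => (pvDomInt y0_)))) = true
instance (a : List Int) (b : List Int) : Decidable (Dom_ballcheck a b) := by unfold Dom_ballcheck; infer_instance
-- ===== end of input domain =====

-- B is value-centric: for each distinct value of a it counts occurrences in the prefix b[:len(a)], subtracting one zip pass of same-position matches; alternative decomposition, same cost.


-- ===== PORT A =====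
-- while loop over k < len(a), counting positions with b[k] in a and b[k] != a[k]
def ballcheck (a : List Int) (b : List Int) : Int :=
  (List.range a.length).foldl (fun (cnt : Int) (k : Nat) =>
    if PySem.List.pyGetD b (k : Int) 0 ∈ a ∧ ¬ PySem.List.pyGetD b (k : Int) 0 = PySem.List.pyGetD a (k : Int) 0
    then cnt + 1 else cnt) 0

-- ===== PORT B =====
-- prefix = b[:len(a)]; strikes by one zip pass; present = sum over set(a) of prefix.count(v)
def ballcheck_alt (a : List Int) (b : List Int) : Int :=
  let n := a.length
  let pre := PySem.List.slice b none (some (n : Int))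
  let strikes : Int := ((a.zip pre).filter (fun p => decide (p.1 = p.2))).length
  let present : Int := ((PySem.Set.ofList a).map (fun v => (PySem.List.count pre v : Int))).sum
  present - strikes

-- ===== PRECONDITION & SPEC =====
-- A raises IndexError when b is shorter than a; those inputs are excluded.
def Pre_ballcheck (a : List Int) (b : List Int) : Prop := a.length ≤ b.length
instance (a : List Int) (b : List Int) : Decidable (Pre_ballcheck a b) := by unfold Pre_ballcheck; infer_instance
def pvWitness_ballcheck : List Int × List Int := ([1, 2, 3], [3, 2, 4])

def Spec_ballcheck (a : List Int) (b : List Int) (out : Int) : Prop := out = ballcheck_alt a b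
instance (a : List Int) (b : List Int) (out : Int) : Decidable (Spec_ballcheck a b out) := by unfold Spec_ballcheck; infer_instance

-- ===== CLAIM =====
def Claim_equal_ballcheck : Prop := ∀ (a : List Int) (b : List Int), Dom_ballcheck a b → Pre_ballcheck a b → Spec_ballcheck a b (ballcheck a b)

-- ===== LEMMAS AND PROOFS =====

-- A's loop equals (count of positions whose b-digit occurs in a) minus (count of same-position matches)
lemma ballcheck_key (a b : List Int) (l : List Nat) (hl : ∀ k ∈ l, k < a.length) :
    ∀ i : Int,
    l.foldl (fun (cnt : Int) (k : Nat) =>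
      if PySem.List.pyGetD b (k : Int) 0 ∈ a ∧ ¬ PySem.List.pyGetD b (k : Int) 0 = PySem.List.pyGetD a (k : Int) 0
      then cnt + 1 else cnt) i
    = i + ((l.filter (fun (k : Nat) => decide (PySem.List.pyGetD b (k : Int) 0 ∈ a))).length : Int)
        - ((l.filter (fun (k : Nat) => decide (PySem.List.pyGetD a (k : Int) 0 = PySem.List.pyGetD b (k : Int) 0))).length : Int) := by
  induction l with
  | nil => intro i; simp
  | cons x l ih =>
    intro i
    have hx : x < a.length := hl x (by simp)
    have hmem : PySem.List.pyGetD a (x : Int) 0 ∈ a :=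
      PySem.List.pyGetD_mem a 0 ⟨by omega, by exact_mod_cast hx⟩
    have hrec := ih (fun k hk => hl k (by simp [hk]))
    rw [List.foldl_cons, List.filter_cons, List.filter_cons]
    by_cases hq : PySem.List.pyGetD a (x : Int) 0 = PySem.List.pyGetD b (x : Int) 0
    · have hp : PySem.List.pyGetD b (x : Int) 0 ∈ a := hq ▸ hmem
      rw [if_neg (by simp [hq.symm])]
      simp only [hq, hp, decide_true]
      rw [hrec i]; push_cast [List.length_cons]; ring
    · by_cases hp : PySem.List.pyGetD b (x : Int) 0 ∈ a
      · rw [if_pos ⟨hp, fun h => hq h.symm⟩]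
        simp only [hp, decide_true, decide_eq_true_eq, if_neg hq]
        rw [hrec (i + 1)]; push_cast [List.length_cons]; ring
      · rw [if_neg (fun h => hp h.1)]
        simp only [decide_eq_true_eq, if_neg hq, if_neg hp]
        exact hrec i

-- splitting membership in v :: s (v not in s) into count-of-v plus membership in s
lemma countP_mem_cons (v : Int) (s : List Int) (hv : v ∉ s) (pre : List Int) :
    pre.countP (fun x => decide (x ∈ v :: s))
      = pre.count v + pre.countP (fun x => decide (x ∈ s)) := by
  induction pre with
  | nil => simp
  | cons x t ih =>
    rw [List.countP_cons, List.count_cons, List.countP_cons, ih]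
    by_cases hxv : x = v
    · subst hxv
      simp [hv]
      omega
    · by_cases hxs : x ∈ s
      · simp [hxv, hxs]
        omega
      · simp [hxv, hxs]

-- present as a value-centric sum: Σ_{v ∈ s} count pre v = number of elements of pre lying in s (s without duplicates)
lemma sum_counts (s pre : List Int) (hs : s.Nodup) :
    (s.map (fun v => pre.count v)).sum = pre.countP (fun x => decide (x ∈ s)) := by
  induction s with
  | nil => simp
  | cons v s ih =>
    rcases List.nodup_cons.mp hs with ⟨hv, hs'⟩
    rw [List.map_cons, List.sum_cons, ih hs', countP_mem_cons v s hv pre]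

-- positional filter over range n equals countP on take n
lemma range_filter_take (p : Int → Prop) [DecidablePred p] (b : List Int) (n : Nat) (h : n ≤ b.length) :
    ((List.range n).filter (fun (k : Nat) => decide (p (PySem.List.pyGetD b (k : Int) 0)))).length
      = (b.take n).countP (fun x => decide (p x)) := by
  induction n generalizing b with
  | zero => simp
  | succ n ih =>
    cases b with
    | nil => simp at h
    | cons y b =>
      have hb : n ≤ b.length := by simpa using h
      rw [List.range_succ_eq_map, List.filter_cons, List.filter_map]
      have hshift : ((fun (k : Nat) => decide (p (PySem.List.pyGetD (y :: b) (k : Int) 0))) ∘ Nat.succ)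
          = fun (k : Nat) => decide (p (PySem.List.pyGetD b (k : Int) 0)) := by
        funext k
        simp [PySem.List.pyGetD_natCast]
      rw [hshift]
      rw [List.take_succ_cons, List.countP_cons]
      have ih' := ih b hb
      simp only [PySem.List.pyGetD_natCast, List.getD_eq_getElem?_getD] at ih'
      by_cases hy : p y
      · rw [if_pos (by simp [hy])]
        simp [hy, ih', Nat.add_comm]
      · rw [if_neg (by simp [hy])]
        simp [hy, ih']

-- positional strike filter over range equals the zip pass
lemma range_filter_zip (a b : List Int) (h : a.length ≤ b.length) :
    ((List.range a.length).filter (fun (k : Nat) => decide (PySem.List.pyGetD a (k : Int) 0 = PySem.List.pyGetD b (k : Int) 0))).length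
      = ((a.zip b).filter (fun p => decide (p.1 = p.2))).length := by
  induction a generalizing b with
  | nil => simp
  | cons x a ih =>
    cases b with
    | nil => simp at h
    | cons y b =>
      have hb : a.length ≤ b.length := by simpa using h
      rw [List.length_cons, List.range_succ_eq_map, List.filter_cons, List.filter_map]
      have hshift : ((fun (k : Nat) => decide (PySem.List.pyGetD (x :: a) (k : Int) 0 = PySem.List.pyGetD (y :: b) (k : Int) 0)) ∘ Nat.succ)
          = fun (k : Nat) => decide (PySem.List.pyGetD a (k : Int) 0 = PySem.List.pyGetD b (k : Int) 0) := by
        funext k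
        simp [PySem.List.pyGetD_natCast]
      rw [hshift]
      rw [List.zip_cons_cons, List.filter_cons]
      have ih' := ih b hb
      simp only [PySem.List.pyGetD_natCast, List.getD_eq_getElem?_getD] at ih'
      by_cases hxy : x = y
      · rw [if_pos (by simp [hxy])]
        simp [hxy, ih']
      · rw [if_neg (by simp [hxy])]
        simp [hxy, ih']

-- zipping with the prefix is zipping with b itself
lemma zip_take_self (a b : List Int) : a.zip (b.take a.length) = a.zip b := by
  induction a generalizing b with
  | nil => simp
  | cons x a ih =>
    cases b with
    | nil => simp
    | cons y b => simp [ih]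

-- ===== VERDICT =====
theorem ballcheck_spec : Claim_equal_ballcheck := by
  intro a b _ hpre
  unfold Spec_ballcheck ballcheck ballcheck_alt
  dsimp only
  rw [ballcheck_key a b (List.range a.length) (fun k hk => List.mem_range.mp hk) 0]
  rw [PySem.List.slice_to_natCast]
  have hpresent :
      ((PySem.Set.ofList a).map (fun v => (PySem.List.count (b.take a.length) v : Int))).sum
        = (((List.range a.length).filter (fun (k : Nat) => decide (PySem.List.pyGetD b (k : Int) 0 ∈ a))).length : Int) := by
    have hnat : ((PySem.Set.ofList a).map (fun v => PySem.List.count (b.take a.length) v)).sum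
        = ((List.range a.length).filter (fun (k : Nat) => decide (PySem.List.pyGetD b (k : Int) 0 ∈ a))).length := by
      rw [range_filter_take (fun x => x ∈ a) b a.length hpre]
      have := sum_counts (PySem.Set.ofList a) (b.take a.length) (PySem.Set.nodup_ofList a)
      simp only [PySem.List.count_eq]
      rw [this]
      apply List.countP_congr
      intro x _
      simp [PySem.Set.mem_ofList]
    calc ((PySem.Set.ofList a).map (fun v => (PySem.List.count (b.take a.length) v : Int))).sum
        = (((PySem.Set.ofList a).map (fun v => PySem.List.count (b.take a.length) v)).sum : Int) := by
          rw [Nat.cast_list_sum, List.map_map]; rfl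
      _ = _ := by rw [hnat]
  have hstrike :
      (((a.zip (b.take a.length)).filter (fun p => decide (p.1 = p.2))).length : Int)
        = (((List.range a.length).filter (fun (k : Nat) => decide (PySem.List.pyGetD a (k : Int) 0 = PySem.List.pyGetD b (k : Int) 0))).length : Int) := by
    rw [zip_take_self, range_filter_zip a b hpre]
  simp only [hpresent, hstrike]
  ring
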